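-- pv_equiv track=rewrite | github.com/benwatson528/advent-of-code-16 | main/day20/firewall_rules.py | solve_lowest
-- ===== SOURCE A (Python) =====
-- MAX_IP = 4294967295
--
-- def solve_lowest(blocked_ranges) -> int:
--     lowest = MAX_IP
--     for c in blocked_ranges:
--         for possible in c[0] - 1, c[1] + 1:
--             if possible < 0:
--                 continue
--             is_blocked = False
--             for d in blocked_ranges:
--                 if possible in range(d[0], d[1] + 1):
--                     is_blocked = True
--             if not is_blocked:
--                 lowest = min(lowest, possible)
--     return lowest
-- ===== SOURCE B (Python) =====
-- MAX_IP = 4294967295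
--
--
-- def _merge(rs):
--     """Merge a start-sorted interval list into a start-sorted list whose
--     consecutive intervals are separated by a gap (coverage-preserving)."""
--     out = []
--     for a, b in rs:
--         if out and a <= out[-1][1] + 1:
--             out[-1] = (out[-1][0], max(out[-1][1], b))
--         else:
--             out.append((a, b))
--     return out
--
--
-- def _covered(merged, p):
--     """Membership of p in the merged intervals; early exit uses sortedness."""
--     for a, b in merged:
--         if a > p:
--             return False
--         if p <= b:
--             return True
--     return False
--
--
-- def solve_lowest(blocked_ranges) -> int:
--     merged = _merge(sorted(blocked_ranges, key=lambda r: r[0]))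
--     lowest = MAX_IP
--     for a, b in blocked_ranges:
--         for p in (a - 1, b + 1):
--             if p >= 0 and not _covered(merged, p):
--                 lowest = min(lowest, p)
--     return lowest
-- ===== Notes on version B (the rewrite author's own statement) =====
-- stated objective: faster
-- what changed: B sorts the ranges once and merges them into a sorted gap-separated interval list, so each boundary candidate is tested against the merged list with an early-exit scan instead of A's full inner scan over all ranges per candidate.
import Mathlib
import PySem

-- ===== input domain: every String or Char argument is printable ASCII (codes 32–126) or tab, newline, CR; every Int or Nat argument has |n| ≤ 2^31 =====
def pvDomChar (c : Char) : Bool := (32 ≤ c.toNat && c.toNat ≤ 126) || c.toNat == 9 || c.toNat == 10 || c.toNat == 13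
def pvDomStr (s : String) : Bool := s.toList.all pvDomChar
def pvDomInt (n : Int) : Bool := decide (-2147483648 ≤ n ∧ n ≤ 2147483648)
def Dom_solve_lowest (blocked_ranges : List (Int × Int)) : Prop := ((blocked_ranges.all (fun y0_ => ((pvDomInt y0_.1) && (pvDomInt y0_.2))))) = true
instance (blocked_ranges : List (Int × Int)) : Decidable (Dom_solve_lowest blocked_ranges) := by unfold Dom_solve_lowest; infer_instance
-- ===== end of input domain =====

-- B merges the sorted ranges once and checks candidates against the merged list (early exit);
-- objective: faster (removes A's full inner scan over all ranges per candidate).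

-- ===== PORT A =====
-- literal port: `possible in range(d[0], d[1] + 1)` is `d.1 ≤ possible ∧ possible ≤ d.2` (step-1 range membership, exact)
def solve_lowest (blocked_ranges : List (Int × Int)) : Int :=
  blocked_ranges.foldl (fun lowest c =>
    [c.1 - 1, c.2 + 1].foldl (fun lowest possible =>
      if possible < 0 then lowest
      else
        let is_blocked := blocked_ranges.foldl (fun ib d =>
          if d.1 ≤ possible ∧ possible ≤ d.2 then true else ib) false
        if is_blocked then lowest else min lowest possible) lowest) 4294967295

-- ===== PORT B =====
-- _merge: Python appends to `out` and modifies out[-1]; ported with the accumulator kept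
-- head-first (head = Python's out[-1]) and reversed at the end — exact transliteration of the loop.
def mergeStep (out : List (Int × Int)) (r : Int × Int) : List (Int × Int) :=
  match out with
  | (pa, pb) :: rest => if r.1 ≤ pb + 1 then (pa, max pb r.2) :: rest else r :: (pa, pb) :: rest
  | [] => [r]

def mergeRanges (rs : List (Int × Int)) : List (Int × Int) :=
  (rs.foldl mergeStep []).reverse

-- _covered: loop with early `return False` when a > p
def coveredRanges : List (Int × Int) → Int → Bool
  | [], _ => false
  | (a, b) :: rest, p => if a > p then false else if p ≤ b then true else coveredRanges rest p

def solve_lowest_alt (blocked_ranges : List (Int × Int)) : Int :=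
  let merged := mergeRanges (PySem.List.sorted blocked_ranges (fun r => r.1) false)
  blocked_ranges.foldl (fun lowest c =>
    [c.1 - 1, c.2 + 1].foldl (fun lowest p =>
      if 0 ≤ p ∧ coveredRanges merged p = false then min lowest p else lowest) lowest) 4294967295

-- ===== PRECONDITION & SPEC =====
def Spec_solve_lowest (blocked_ranges : List (Int × Int)) (out : Int) : Prop := out = solve_lowest_alt blocked_ranges
instance (blocked_ranges : List (Int × Int)) (out : Int) : Decidable (Spec_solve_lowest blocked_ranges out) := by unfold Spec_solve_lowest; infer_instance

-- ===== CLAIM (what is proved, stated in full; the proofs are below) =====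
def Claim_equal_solve_lowest : Prop := ∀ (blocked_ranges : List (Int × Int)), Dom_solve_lowest blocked_ranges → Spec_solve_lowest blocked_ranges (solve_lowest blocked_ranges)

-- ===== LEMMAS AND PROOFS =====

-- A's inner loop is an "any" over the ranges
theorem foldl_blocked_any (l : List (Int × Int)) (p : Int) (b : Bool) :
    l.foldl (fun ib d => if d.1 ≤ p ∧ p ≤ d.2 then true else ib) b
      = (b || l.any fun d => decide (d.1 ≤ p ∧ p ≤ d.2)) := by
  induction l generalizing b with
  | nil => simp
  | cons x t ih =>
      simp only [List.foldl, List.any_cons, ih]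
      by_cases h : x.1 ≤ p ∧ p ≤ x.2 <;> simp [h]

-- the early-exit scan is exact on a start-sorted list
theorem covered_iff (l : List (Int × Int)) (p : Int)
    (hs : l.Pairwise (fun x y => x.1 ≤ y.1)) :
    coveredRanges l p = true ↔ ∃ r ∈ l, r.1 ≤ p ∧ p ≤ r.2 := by
  induction l with
  | nil => simp [coveredRanges]
  | cons x t ih =>
      obtain ⟨hx, ht⟩ := List.pairwise_cons.mp hs
      by_cases h1 : x.1 > p
      · simp only [coveredRanges, if_pos h1]
        constructor
        · intro h; exact absurd h (by simp)
        · rintro ⟨r, hr, hr1, hr2⟩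
          rcases List.mem_cons.mp hr with rfl | hr
          · omega
          · have := hx r hr; omega
      · by_cases h2 : p ≤ x.2
        · simp only [coveredRanges, if_neg h1, if_pos h2]
          exact iff_of_true (by trivial) ⟨x, by simp, by omega, h2⟩
        · simp only [coveredRanges, if_neg h1, if_neg h2]
          rw [ih ht]
          constructor
          · rintro ⟨r, hr, h⟩; exact ⟨r, by simp [hr], h⟩
          · rintro ⟨r, hr, hr1, hr2⟩
            rcases List.mem_cons.mp hr with rfl | hr
            · omega
            · exact ⟨r, hr, hr1, hr2⟩

-- loop invariant of the merge fold: accumulator reverse-sorted by start, coverage preserved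
theorem merge_loop (l : List (Int × Int)) :
    ∀ (acc : List (Int × Int)),
    l.Pairwise (fun x y => x.1 ≤ y.1) →
    acc.Pairwise (fun x y => y.1 ≤ x.1) →
    (∀ x ∈ acc, ∀ y ∈ l, x.1 ≤ y.1) →
    (l.foldl mergeStep acc).Pairwise (fun x y => y.1 ≤ x.1) ∧
    ∀ p, ((∃ r ∈ l.foldl mergeStep acc, r.1 ≤ p ∧ p ≤ r.2) ↔
          (∃ r ∈ acc, r.1 ≤ p ∧ p ≤ r.2) ∨ (∃ r ∈ l, r.1 ≤ p ∧ p ≤ r.2)) := by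
  induction l with
  | nil => intro acc _ hacc _; refine ⟨hacc, fun p => ?_⟩; simp
  | cons r t ih =>
      intro acc hsort hacc hbound
      obtain ⟨hrt, ht⟩ := List.pairwise_cons.mp hsort
      have hstep : (mergeStep acc r).Pairwise (fun x y => y.1 ≤ x.1) ∧
          (∀ x ∈ mergeStep acc r, ∀ y ∈ t, x.1 ≤ y.1) ∧
          ∀ p, ((∃ s ∈ mergeStep acc r, s.1 ≤ p ∧ p ≤ s.2) ↔
                (∃ s ∈ acc, s.1 ≤ p ∧ p ≤ s.2) ∨ (r.1 ≤ p ∧ p ≤ r.2)) := by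
        cases acc with
        | nil =>
            refine ⟨by simp [mergeStep], ?_, ?_⟩
            · intro x hx y hy
              simp only [mergeStep, List.mem_singleton] at hx
              subst hx; exact hrt y hy
            · intro p; simp [mergeStep]
        | cons hd rest =>
            obtain ⟨pa, pb⟩ := hd
            obtain ⟨hhead, hrest⟩ := List.pairwise_cons.mp hacc
            have hpar : pa ≤ r.1 := hbound (pa, pb) (by simp) r (by simp)
            by_cases hm : r.1 ≤ pb + 1
            · refine ⟨?_, ?_, ?_⟩
              · simp only [mergeStep, if_pos hm]
                exact List.pairwise_cons.mpr ⟨fun y hy => hhead y hy, hrest⟩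
              · intro x hx y hy
                simp only [mergeStep, if_pos hm, List.mem_cons] at hx
                rcases hx with rfl | hx
                · exact le_trans hpar (hrt y hy)
                · exact hbound x (by simp [hx]) y (by simp [hy])
              · intro p
                simp only [mergeStep, if_pos hm, List.mem_cons]
                constructor
                · rintro ⟨s, hs, h1, h2⟩
                  rcases hs with rfl | hs
                  · simp only at h1 h2
                    by_cases hb : p ≤ pb
                    · exact Or.inl ⟨(pa, pb), Or.inl rfl, h1, hb⟩
                    · exact Or.inr ⟨by omega, by omega⟩
                  · exact Or.inl ⟨s, Or.inr hs, h1, h2⟩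
                · rintro (⟨s, hs, h1, h2⟩ | ⟨h1, h2⟩)
                  · rcases hs with rfl | hs
                    · exact ⟨(pa, max pb r.2), Or.inl rfl, h1, by simp; omega⟩
                    · exact ⟨s, Or.inr hs, h1, h2⟩
                  · exact ⟨(pa, max pb r.2), Or.inl rfl, by omega, by simp; omega⟩
            · refine ⟨?_, ?_, ?_⟩
              · simp only [mergeStep, if_neg hm]
                refine List.pairwise_cons.mpr ⟨?_, hacc⟩
                intro y hy
                rcases List.mem_cons.mp hy with rfl | hy
                · exact hpar
                · exact le_trans (hhead y hy) hpar
              · intro x hx y hy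
                simp only [mergeStep, if_neg hm, List.mem_cons] at hx
                rcases hx with rfl | hx
                · exact hrt y hy
                · exact hbound x (by simpa using hx) y (by simp [hy])
              · intro p
                simp only [mergeStep, if_neg hm, List.mem_cons]
                constructor
                · rintro ⟨s, hs, h1, h2⟩
                  rcases hs with rfl | hs
                  · exact Or.inr ⟨h1, h2⟩
                  · exact Or.inl ⟨s, hs, h1, h2⟩
                · rintro (⟨s, hs, h1, h2⟩ | ⟨h1, h2⟩)
                  · exact ⟨s, Or.inr hs, h1, h2⟩
                  · exact ⟨r, Or.inl rfl, h1, h2⟩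
      obtain ⟨h1, h2, h3⟩ := hstep
      obtain ⟨hp, hcov⟩ := ih (mergeStep acc r) ht h1 h2
      refine ⟨hp, fun p => ?_⟩
      rw [List.foldl_cons, hcov p, h3 p]
      simp only [List.mem_cons]
      constructor
      · rintro (h | h)
        · rcases h with h | h
          · exact Or.inl h
          · exact Or.inr ⟨r, Or.inl rfl, h⟩
        · obtain ⟨s, hs, h⟩ := h; exact Or.inr ⟨s, Or.inr hs, h⟩
      · rintro (h | ⟨s, hs, h⟩)
        · exact Or.inl (Or.inl h)
        · rcases hs with rfl | hs
          · exact Or.inl (Or.inr h)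
          · exact Or.inr ⟨s, hs, h⟩

-- the merged membership test equals A's inner "any" scan
theorem covered_merged_eq (rs : List (Int × Int)) (p : Int) :
    coveredRanges (mergeRanges (PySem.List.sorted rs (fun r => r.1) false)) p
      = rs.any (fun d => decide (d.1 ≤ p ∧ p ≤ d.2)) := by
  set s := PySem.List.sorted rs (fun r => r.1) false with hsdef
  have hs : s.Pairwise (fun x y : Int × Int => x.1 ≤ y.1) := PySem.List.sorted_pairwise rs _
  have hperm : s.Perm rs := PySem.List.sorted_perm rs _ _
  obtain ⟨hp, hcov⟩ := merge_loop s [] hs (by simp) (by simp)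
  have hps : (mergeRanges s).Pairwise (fun x y : Int × Int => x.1 ≤ y.1) := by
    unfold mergeRanges
    rw [List.pairwise_reverse]
    exact hp
  rw [Bool.eq_iff_iff, covered_iff _ _ hps, List.any_eq_true]
  have hmem : ∀ r : Int × Int, r ∈ mergeRanges s ↔ r ∈ s.foldl mergeStep [] := by
    intro r; unfold mergeRanges; exact List.mem_reverse
  constructor
  · rintro ⟨r, hr, h⟩
    have := (hcov p).mp ⟨r, (hmem r).mp hr, h⟩
    rcases this with h' | ⟨d, hd, h1, h2⟩
    · simp at h'
    · exact ⟨d, hperm.mem_iff.mp hd, by simpa using And.intro h1 h2⟩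
  · rintro ⟨d, hd, h⟩
    simp only [decide_eq_true_eq] at h
    obtain ⟨r, hr, hcr⟩ := (hcov p).mpr (Or.inr ⟨d, hperm.mem_iff.mpr hd, h⟩)
    exact ⟨r, (hmem r).mpr hr, hcr⟩

-- the two per-candidate steps agree once the blocked tests agree
theorem step_eq (blocked covered : Bool) (hc : covered = blocked) (lo p : Int) :
    (if p < 0 then lo else if blocked then lo else min lo p)
      = (if 0 ≤ p ∧ covered = false then min lo p else lo) := by
  subst hc
  by_cases h : p < 0 <;> cases covered <;> simp [h] at *

theorem solve_lowest_eq (rs : List (Int × Int)) : solve_lowest rs = solve_lowest_alt rs := by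
  unfold solve_lowest solve_lowest_alt
  apply List.foldl_ext
  intro lowest c _
  simp only [List.foldl]
  have hstep : ∀ (lo p : Int),
      (if p < 0 then lo
       else if rs.foldl (fun ib d => if d.1 ≤ p ∧ p ≤ d.2 then true else ib) false then lo
       else min lo p)
        = (if 0 ≤ p ∧ coveredRanges (mergeRanges (PySem.List.sorted rs (fun r => r.1) false)) p = false
           then min lo p else lo) := by
    intro lo p
    rw [foldl_blocked_any rs p false, Bool.false_or]
    exact step_eq _ _ (covered_merged_eq rs p) lo p
  rw [hstep lowest (c.1 - 1), hstep _ (c.2 + 1)]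

-- ===== VERDICT (by name: the statement is the Claim_ definition above) =====
theorem solve_lowest_spec : Claim_equal_solve_lowest := by
  intro rs _
  unfold Spec_solve_lowest
  exact solve_lowest_eq rs
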